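-- pv_equiv track=rewrite | github.com/PlantPeptide/BPAST | BPAST(Smart).py | analyze_conserved_positions
-- ===== SOURCE A (Python) =====
-- from collections import defaultdict
--
-- def analyze_conserved_positions(m_seqs):
--     if not m_seqs:
--         return 0, [], []
--
--     # 用于存储每个位置的氨基酸 (Used to store amino acids at each position)
--     positions = defaultdict(set)
--
--     # 遍历每个序列 (Traverse each sequence)
--     for seq in m_seqs:
--         for idx, amino_acid in enumerate(seq):
--             positions[idx].add(amino_acid)
--
--     # 找到保守氨基酸的位置和氨基酸 (Find the position of conserved amino acids and amino acids)
--     conserved_positions = []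
--     conserved_acids = []
--
--     for idx, acids in positions.items():
--         if len(acids) == 1:  # 只有一个氨基酸在这个位置出现 (Only one amino acid appears at this position)
--             conserved_positions.append(idx)
--             conserved_acids.append(acids.pop())
--
--     # 输出结果 (Output result)
--     S = len(conserved_positions)
--     # 将位置转化为相对位置（-1 表示从末尾开始计数）(Converts a position to a relative position (-1 means counting from the end))
--     positions_relative = [(pos + 1) if pos >= 0 else pos for pos in conserved_positions]
--
--     return S, positions_relative, conserved_acids
-- ===== SOURCE B (Python) =====
-- def analyze_conserved_positions(m_seqs):
--     if not m_seqs: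
--         return 0, [], []
--     L = max(len(seq) for seq in m_seqs)
--     conserved_positions = []
--     conserved_acids = []
--     for idx in range(L):
--         acids = {seq[idx] for seq in m_seqs if idx < len(seq)}
--         if len(acids) == 1:
--             conserved_positions.append(idx)
--             conserved_acids.append(next(iter(acids)))
--     return len(conserved_positions), [p + 1 for p in conserved_positions], conserved_acids
-- ===== Notes on version B (the rewrite author's own statement) =====
-- stated objective: simpler
-- what changed: Replaces the row-major defaultdict-of-sets build plus a second pass over dict items with a single column-major pass over range(max length), building each column's set directly; no intermediate dict.
import Mathlib
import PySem

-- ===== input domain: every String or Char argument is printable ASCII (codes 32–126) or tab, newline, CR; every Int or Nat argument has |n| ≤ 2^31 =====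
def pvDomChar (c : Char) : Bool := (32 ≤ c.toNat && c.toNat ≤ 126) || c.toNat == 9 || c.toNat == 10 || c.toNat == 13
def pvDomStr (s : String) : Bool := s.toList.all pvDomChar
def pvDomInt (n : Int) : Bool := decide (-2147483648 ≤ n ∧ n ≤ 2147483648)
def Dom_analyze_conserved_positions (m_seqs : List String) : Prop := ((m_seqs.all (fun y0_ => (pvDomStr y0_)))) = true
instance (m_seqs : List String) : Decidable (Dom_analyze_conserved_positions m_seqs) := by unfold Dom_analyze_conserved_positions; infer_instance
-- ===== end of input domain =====

-- B replaces A's row-major defaultdict-of-sets build plus a second pass over the dict's items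
-- with one column-major pass over range(max length), building each column's set directly (simpler).

-- ===== PORT A =====
-- literal transliteration of A; acids.pop() on the singleton set is its sole element,
-- appended as the one-character string String.ofList of that singleton list
def analyze_conserved_positions (m_seqs : List String) : Int × List Int × List String :=
  if m_seqs = [] then (0, [], [])
  else
    let positions : PySem.Dict Int (PySem.Set Char) :=
      m_seqs.foldl (fun d seq =>
        (PySem.List.enumerate seq.toList 0).foldl
          (fun d p => d.modify p.1 PySem.Set.empty (fun s => PySem.Set.add s p.2)) d)
        PySem.Dict.empty
    let res : List Int × List String := positions.items.foldl
      (fun acc p =>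
        if PySem.Set.len p.2 == 1 then (acc.1 ++ [p.1], acc.2 ++ [String.ofList p.2]) else acc)
      ([], [])
    ((res.1.length : Int), res.1.map (fun pos => if pos ≥ 0 then pos + 1 else pos), res.2)

-- ===== PORT B =====
def analyze_conserved_positions_alt (m_seqs : List String) : Int × List Int × List String :=
  if m_seqs = [] then (0, [], [])
  else
    let L : Int := (PySem.List.max? (m_seqs.map (fun s => (PySem.Str.len s : Int))) (fun x => x)).getD 0
    let res : List Int × List String := (PySem.List.pyRange 0 L 1).foldl
      (fun acc idx =>
        let acids : PySem.Set Char := PySem.Set.ofList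
          (m_seqs.filterMap (fun s => if idx < (PySem.Str.len s : Int) then PySem.Str.pyGet? s idx else none))
        if PySem.Set.len acids == 1 then (acc.1 ++ [idx], acc.2 ++ [String.ofList acids]) else acc)
      ([], [])
    ((res.1.length : Int), res.1.map (fun p => p + 1), res.2)

-- the common fold over column indices
-- (the port of B follows Source B: next(iter(acids)) on the singleton set is its sole element)

-- ===== PRECONDITION & SPEC =====
def Spec_analyze_conserved_positions (m_seqs : List String) (out : Int × List Int × List String) : Prop := out = analyze_conserved_positions_alt m_seqs
instance (m_seqs : List String) (out : Int × List Int × List String) : Decidable (Spec_analyze_conserved_positions m_seqs out) := by unfold Spec_analyze_conserved_positions; infer_instance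

-- ===== CLAIM (what is proved, stated in full; the proofs are below) =====
def Claim_equal_analyze_conserved_positions : Prop := ∀ (m_seqs : List String), Dom_analyze_conserved_positions m_seqs → Spec_analyze_conserved_positions m_seqs (analyze_conserved_positions m_seqs)

-- ===== LEMMAS AND PROOFS =====

def pvExt (n : Nat) (f : Nat → PySem.Set Char) : Nat → PySem.Set Char :=
  fun j => if j < n then f j else PySem.Set.empty
lemma pv_nodup_rkeys (m : Nat) (f : Nat → PySem.Set Char) :
    (((List.range m).map (fun (j : Nat) => ((j : Int), f j))).map Prod.fst).Nodup := by
  rw [List.map_map]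
  exact (List.nodup_range).map (fun a b h => by simpa using h)
lemma pv_modify_items (d : PySem.Dict Int (PySem.Set Char)) (m k : Nat) (f : Nat → PySem.Set Char)
    (c : Char) (hk : k ≤ m)
    (hd : d.items = (List.range m).map (fun (j : Nat) => ((j : Int), f j))) :
    (d.modify (k : Int) PySem.Set.empty (fun s => PySem.Set.add s c)).items =
      (List.range (max m (k + 1))).map
        (fun (j : Nat) => ((j : Int), if j = k then PySem.Set.add (pvExt m f k) c else f j)) := by
  have hnd : d.keys.Nodup := by
    simp only [PySem.Dict.keys, hd]; exact pv_nodup_rkeys m f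
  show (d.insert (k : Int) (PySem.Set.add (d.getD (k : Int) PySem.Set.empty) c)).items = _
  rcases lt_or_eq_of_le hk with hlt | rfl
  · have hmem : ((k : Int), f k) ∈ d.items := by
      rw [hd]; exact List.mem_map.mpr ⟨k, List.mem_range.mpr hlt, rfl⟩
    have hcont : d.contains (k : Int) = true := by
      rw [PySem.Dict.contains_iff_mem_keys]
      simp only [PySem.Dict.keys]
      exact List.mem_map.mpr ⟨_, hmem, rfl⟩
    have hget : d.getD (k : Int) PySem.Set.empty = f k :=
      PySem.Dict.getD_of_mem_items d hmem hnd _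
    rw [PySem.Dict.items_insert_of_contains d _ hcont, hd, List.map_map]
    have hmax : max m (k + 1) = m := by omega
    rw [hmax]
    refine List.map_congr_left (fun j hj => ?_)
    have hj' := List.mem_range.mp hj
    by_cases h : j = k
    · subst h
      have h2 := congrArg (fun s => PySem.Set.add s c) hget
      simp only [Function.comp_def, beq_self_eq_true, if_true, pvExt, if_pos hlt] at h2 ⊢
      rw [h2]
    · have : ¬ ((j : Int) == (k : Int)) = true := by
        simp; omega
      simp [Function.comp, this, h]
  · have hcont : d.contains (k : Int) = false := by
      rw [← Bool.not_eq_true, PySem.Dict.contains_iff_mem_keys]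
      simp only [PySem.Dict.keys, hd, List.map_map]
      intro hmem
      rcases List.mem_map.mp hmem with ⟨j, hj, hje⟩
      have := List.mem_range.mp hj
      simp only [Function.comp] at hje
      omega
    have hget : d.getD (k : Int) PySem.Set.empty = PySem.Set.empty :=
      PySem.Dict.getD_of_not_contains d _ hcont
    rw [PySem.Dict.items_insert_of_not_contains d _ hcont, hd, hget]
    have hmax : max k (k + 1) = k + 1 := by omega
    rw [hmax, List.range_succ, List.map_append]
    congr 1
    · refine List.map_congr_left (fun j hj => ?_)
      have hj' := List.mem_range.mp hj
      have : ¬ j = k := by omega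
      simp [this]
    · simp [pvExt]

lemma pv_inner_items (cs : List Char) (d : PySem.Dict Int (PySem.Set Char)) (n : Nat)
    (f : Nat → PySem.Set Char)
    (hd : d.items = (List.range n).map (fun (j : Nat) => ((j : Int), f j))) :
    ((PySem.List.enumerate cs 0).foldl
        (fun d p => d.modify p.1 PySem.Set.empty (fun s => PySem.Set.add s p.2)) d).items =
      (List.range (max n cs.length)).map
        (fun (j : Nat) => ((j : Int),
          match cs[j]? with
          | some c => PySem.Set.add (pvExt n f j) c
          | none => pvExt n f j)) := by
  induction cs using List.reverseRecOn with
  | nil =>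
      simp only [PySem.List.enumerate_nil, List.foldl_nil, List.length_nil, Nat.max_zero, hd]
      refine List.map_congr_left (fun j hj => ?_)
      have := List.mem_range.mp hj
      simp [pvExt, this]
  | append_singleton cs c ih =>
      rw [PySem.List.enumerate_append, List.foldl_append]
      simp only [PySem.List.enumerate_cons, PySem.List.enumerate_nil, List.foldl_cons,
        List.foldl_nil, zero_add]
      have hk : cs.length ≤ max n cs.length := le_max_right _ _
      rw [pv_modify_items _ (max n cs.length) cs.length _ c hk ih]
      have hmax : max (max n cs.length) (cs.length + 1) = max n (cs ++ [c]).length := by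
        simp [List.length_append]
      rw [hmax]
      refine List.map_congr_left (fun j hj => ?_)
      have hj' := List.mem_range.mp hj
      by_cases h : j = cs.length
      · subst h
        have hg : (cs ++ [c])[cs.length]? = some c := by
          simp
        rw [hg, if_pos rfl]
        congr 1
        by_cases hm : cs.length < max n cs.length
        · have hn : cs.length < n := by omega
          simp only [pvExt, if_pos hm, if_pos hn]
          simp
        · have hn : ¬ cs.length < n := by omega
          simp [pvExt, hm, hn]
      · rw [if_neg h]
        by_cases hlt : j < cs.length
        · have : (cs ++ [c])[j]? = cs[j]? := by
            rw [List.getElem?_append_left hlt]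
          rw [this]
        · have hgt : cs.length < j := by omega
          have h1 : (cs ++ [c])[j]? = none := by
            rw [List.getElem?_eq_none]
            simp
            omega
          have h2 : cs[j]? = none := by rw [List.getElem?_eq_none]; omega
          rw [h1, h2]

def pvColAcc (seqs : List String) (F : Nat → PySem.Set Char) (j : Nat) : PySem.Set Char :=
  seqs.foldl (fun s q => match q.toList[j]? with | some c => PySem.Set.add s c | none => s) (F j)

lemma pv_ext_step (q : String) (n : Nat) (f : Nat → PySem.Set Char) :
    pvExt (max n q.toList.length)
        (fun j => match q.toList[j]? with
          | some c => PySem.Set.add (pvExt n f j) c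
          | none => pvExt n f j) =
      (fun j => match q.toList[j]? with
        | some c => PySem.Set.add (pvExt n f j) c
        | none => pvExt n f j) := by
  funext j
  by_cases h : j < max n q.toList.length
  · simp only [pvExt, if_pos h]
  · have h1 : q.toList[j]? = none := by rw [List.getElem?_eq_none]; omega
    have h2 : ¬ j < n := by omega
    simp [pvExt, h1, h2]

lemma pv_dict_items (seqs : List String) (d : PySem.Dict Int (PySem.Set Char)) (n : Nat)
    (f : Nat → PySem.Set Char)
    (hd : d.items = (List.range n).map (fun (j : Nat) => ((j : Int), f j))) :
    (seqs.foldl (fun d seq =>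
        (PySem.List.enumerate seq.toList 0).foldl
          (fun d p => d.modify p.1 PySem.Set.empty (fun s => PySem.Set.add s p.2)) d) d).items =
      (List.range (seqs.foldl (fun m q => max m q.toList.length) n)).map
        (fun (j : Nat) => ((j : Int), pvColAcc seqs (pvExt n f) j)) := by
  induction seqs generalizing d n f with
  | nil =>
      simp only [List.foldl_nil, hd]
      refine List.map_congr_left (fun j hj => ?_)
      have := List.mem_range.mp hj
      simp [pvColAcc, pvExt, this]
  | cons q rest ih =>
      simp only [List.foldl_cons]
      rw [ih _ (max n q.toList.length) _ (pv_inner_items q.toList d n f hd)]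
      rw [pv_ext_step]
      rfl

lemma pv_colAcc_foldl (j : Nat) (seqs : List String) (s : PySem.Set Char) :
    seqs.foldl (fun s q => match q.toList[j]? with | some c => PySem.Set.add s c | none => s) s =
      (seqs.filterMap (fun q => q.toList[j]?)).foldl PySem.Set.add s := by
  induction seqs generalizing s with
  | nil => rfl
  | cons q rest ih =>
      simp only [List.foldl_cons, List.filterMap_cons]
      cases h : q.toList[j]? with
      | none => simp [ih]
      | some c => simp [ih]

lemma pv_colAcc_ofList (seqs : List String) (j : Nat) :
    pvColAcc seqs (fun _ => PySem.Set.empty) j =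
      PySem.Set.ofList (seqs.filterMap (fun q => q.toList[j]?)) := by
  rw [PySem.Set.ofList_eq_foldl]
  exact pv_colAcc_foldl j seqs _

lemma pv_maxlen_cast (l : List String) (a : Nat) :
    (l.map (fun s => PySem.Str.len s)).foldl max ((a : Nat) : Int) =
      ((l.foldl (fun m q => max m q.toList.length) a : Nat) : Int) := by
  induction l generalizing a with
  | nil => simp
  | cons q rest ih =>
      simp only [List.map_cons, List.foldl_cons]
      rw [show (max ((a:Nat):Int) (PySem.Str.len q)) = (((max a q.toList.length : Nat)) : Int) by
        simp [PySem.Str.len_eq, Nat.cast_max]]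
      exact ih _


def pvBody (m_seqs : List String) (acc : List Int × List String) (j : Nat) : List Int × List String :=
  let C := PySem.Set.ofList (m_seqs.filterMap (fun q => q.toList[j]?))
  if PySem.Set.len C == 1 then (acc.1 ++ [(j : Int)], acc.2 ++ [String.ofList C]) else acc

lemma pv_body_nonneg (m_seqs : List String) (js : List Nat) (acc : List Int × List String)
    (h : ∀ x ∈ acc.1, 0 ≤ x) : ∀ x ∈ (js.foldl (pvBody m_seqs) acc).1, 0 ≤ x := by
  induction js generalizing acc with
  | nil => exact h
  | cons j rest ih =>
      refine ih _ ?_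
      simp only [pvBody]
      split
      · intro x hx
        rcases List.mem_append.mp hx with hx | hx
        · exact h x hx
        · simp only [List.mem_singleton] at hx; subst hx; positivity
      · exact h

-- ===== VERDICT (by name: the statement is the Claim_ definition above) =====
theorem analyze_conserved_positions_spec : Claim_equal_analyze_conserved_positions := by
  intro m_seqs _
  unfold Spec_analyze_conserved_positions
  by_cases hnil : m_seqs = []
  · simp [analyze_conserved_positions, analyze_conserved_positions_alt, hnil]
  · obtain ⟨s0, rest, rfl⟩ := List.exists_cons_of_ne_nil hnil
    simp only [analyze_conserved_positions, analyze_conserved_positions_alt, if_neg hnil]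
    -- the dict's items
    have hempty : (PySem.Dict.empty : PySem.Dict Int (PySem.Set Char)).items =
        (List.range 0).map (fun (j : Nat) => ((j : Int), (fun _ => PySem.Set.empty : Nat → PySem.Set Char) j)) := rfl
    have hitems := pv_dict_items (s0 :: rest) PySem.Dict.empty 0 _ hempty
    have hext0 : pvExt 0 (fun _ => PySem.Set.empty) = (fun _ => PySem.Set.empty) := by
      funext j; simp [pvExt]
    rw [hext0] at hitems
    set M : Nat := (s0 :: rest).foldl (fun m q => max m q.toList.length) 0 with hM
    -- the range
    have hL : ((PySem.List.max? ((s0 :: rest).map (fun s => (PySem.Str.len s : Int))) (fun x => x)).getD 0) = (M : Int) := by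
      rw [List.map_cons, PySem.List.max?_id_cons, Option.getD_some, PySem.Str.len_eq, hM]
      simp only [List.foldl_cons, Nat.zero_max]
      exact pv_maxlen_cast rest s0.toList.length
    rw [hL, PySem.List.pyRange_zero_natCast]
    -- both folds are the canonical fold
    have hA : ((s0 :: rest).foldl (fun d seq =>
          (PySem.List.enumerate seq.toList 0).foldl
            (fun d p => d.modify p.1 PySem.Set.empty (fun s => PySem.Set.add s p.2)) d)
          PySem.Dict.empty).items.foldl
        (fun acc p =>
          if PySem.Set.len p.2 == 1 then (acc.1 ++ [p.1], acc.2 ++ [String.ofList p.2]) else acc)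
        ([], []) = (List.range M).foldl (pvBody (s0 :: rest)) ([], []) := by
      rw [hitems, List.foldl_map]
      congr 1
      funext acc j
      simp only [pvBody, pv_colAcc_ofList]
    have hB : ((List.range M).map (fun (k : Nat) => (k : Int))).foldl
        (fun acc idx =>
          let acids : PySem.Set Char := PySem.Set.ofList
            ((s0 :: rest).filterMap (fun s => if idx < (PySem.Str.len s : Int) then PySem.Str.pyGet? s idx else none))
          if PySem.Set.len acids == 1 then (acc.1 ++ [idx], acc.2 ++ [String.ofList acids]) else acc)
        ([], []) = (List.range M).foldl (pvBody (s0 :: rest)) ([], []) := by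
      rw [List.foldl_map]
      congr 1
      funext acc j
      have hfm : ((s0 :: rest).filterMap (fun s => if (j : Int) < (PySem.Str.len s : Int) then PySem.Str.pyGet? s (j : Int) else none)) =
          ((s0 :: rest).filterMap (fun q => q.toList[j]?)) := by
        refine List.filterMap_congr (fun s _ => ?_)
        by_cases h : (j : Int) < PySem.Str.len s
        · rw [if_pos h, PySem.Str.pyGet?_natCast]
        · rw [if_neg h, eq_comm, List.getElem?_eq_none]
          rw [PySem.Str.len_eq] at h
          exact_mod_cast not_lt.mp h
      simp only [hfm, pvBody]
    rw [hA, hB]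
    -- final packaging: every recorded position is a nonnegative index
    have hmap : ((List.range M).foldl (pvBody (s0 :: rest)) ([], [])).1.map
          (fun pos => if pos ≥ 0 then pos + 1 else pos) =
        ((List.range M).foldl (pvBody (s0 :: rest)) ([], [])).1.map (fun p => p + 1) := by
      refine List.map_congr_left (fun x hx => ?_)
      have := pv_body_nonneg (s0 :: rest) (List.range M) ([], []) (by simp) x hx
      rw [if_pos this]
    rw [hmap]
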